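-- pv_equiv track=rewrite | github.com/josefdc/Algoritmos-Despacho | src/scheduler.py | fifo
-- ===== SOURCE A (Python) =====
-- def fifo(processes):
--     """
--     Algoritmo de planificación FIFO (First In, First Out).
--
--     Args:
--         processes (list): Lista de tuplas (ID, tiempo_llegada, tiempo_ejecucion).
--
--     Returns:
--         gantt_chart (list): Diagrama de Gantt con tuplas (ID, tiempo_inicio, tiempo_fin).
--         metrics (list): Métricas con tuplas (ID, tiempo_espera, tiempo_retorno).
--     """
--     # Ordenar los procesos por tiempo de llegada
--     sorted_processes = sorted(processes, key=lambda x: x[1])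
--     start_time = 0
--     gantt_chart = []
--     metrics = []
--
--     for process in sorted_processes:
--         pid, arrival_time, burst_time = process
--
--         # Ajustar el tiempo de inicio si el proceso llega después del tiempo actual
--         if start_time < arrival_time:
--             start_time = arrival_time
--
--         end_time = start_time + burst_time
--         gantt_chart.append((pid, start_time, end_time))
--
--         # Calcular tiempos de espera y de retorno
--         waiting_time = start_time - arrival_time
--         turnaround_time = waiting_time + burst_time
--         metrics.append((pid, waiting_time, turnaround_time))
--
--         # Actualizar el tiempo de inicio para el siguiente proceso
--         start_time = end_time
--
--     return gantt_chart, metrics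
-- ===== SOURCE B (Python) =====
-- def fifo(processes):
--     # Max-plus reformulation: instead of simulating a clock, compute exclusive
--     # prefix sums P of bursts and the running maximum of slack (arrival - P);
--     # then start = P + slack and end = P + burst + slack are pure formulas.
--     order = sorted(processes, key=lambda x: x[1])
--     prefixes = []
--     total = 0
--     for _pid, _arrival, burst in order:
--         prefixes.append(total)
--         total += burst
--     slacks = []
--     m = 0
--     for (_pid, arrival, _burst), p in zip(order, prefixes):
--         m = max(m, arrival - p)
--         slacks.append(m)
--     gantt_chart = [(pid, p + s, p + b + s)
--                    for (pid, _a, b), p, s in zip(order, prefixes, slacks)]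
--     metrics = [(pid, p + s - a, p + b + s - a)
--                for (pid, a, b), p, s in zip(order, prefixes, slacks)]
--     return gantt_chart, metrics
-- ===== Notes on version B (the rewrite author's own statement) =====
-- stated objective: alternative
-- what changed: The clock simulation (start = max(clock, arrival); clock = start + burst) is replaced by a max-plus reformulation: B builds the vector of exclusive prefix sums of burst times and the running maximum of slack (arrival - prefix), and every Gantt and metric entry is then a pure formula in these vectors (start = prefix + slack, end = prefix + burst + slack), with no clock and no per-step start/arrival comparison.
import Mathlib
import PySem

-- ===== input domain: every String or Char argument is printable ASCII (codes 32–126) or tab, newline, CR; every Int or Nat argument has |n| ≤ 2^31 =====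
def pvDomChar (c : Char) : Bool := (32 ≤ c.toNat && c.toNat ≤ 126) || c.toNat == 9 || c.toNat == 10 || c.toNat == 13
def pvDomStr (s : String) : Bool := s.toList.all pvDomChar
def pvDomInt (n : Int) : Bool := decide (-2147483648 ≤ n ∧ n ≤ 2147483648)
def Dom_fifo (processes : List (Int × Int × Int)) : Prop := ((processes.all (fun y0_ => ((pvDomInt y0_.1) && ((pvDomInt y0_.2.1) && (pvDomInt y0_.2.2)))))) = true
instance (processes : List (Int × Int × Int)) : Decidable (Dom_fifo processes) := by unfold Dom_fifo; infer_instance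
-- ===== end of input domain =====

-- B drops A's clock simulation for a max-plus reformulation: exclusive prefix sums of
-- bursts and a running maximum of slack (arrival - prefix) are built as vectors, and
-- every Gantt/metric entry is a pure formula in them (alternative algorithm, same cost).

-- ===== PORT A =====
-- one loop, state (start_time, gantt_chart, metrics), items appended at the back
def fifo (processes : List (Int × Int × Int)) : (List (Int × Int × Int)) × (List (Int × Int × Int)) :=
  let sorted_processes := PySem.List.sorted processes (fun x => x.2.1) false
  let res := sorted_processes.foldl
    (fun (st : Int × List (Int × Int × Int) × List (Int × Int × Int)) process =>
      let pid := process.1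
      let arrival_time := process.2.1
      let burst_time := process.2.2
      let start_time := if st.1 < arrival_time then arrival_time else st.1
      let end_time := start_time + burst_time
      let waiting_time := start_time - arrival_time
      let turnaround_time := waiting_time + burst_time
      (end_time, st.2.1 ++ [(pid, start_time, end_time)],
                 st.2.2 ++ [(pid, waiting_time, turnaround_time)]))
    (0, [], [])
  (res.2.1, res.2.2)

-- ===== PORT B =====
-- pass 1: exclusive prefix sums of the burst times
def fifoPrefixes : Int → List (Int × Int × Int) → List Int
  | _, [] => []
  | total, (_, _, burst) :: rest => total :: fifoPrefixes (total + burst) rest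

-- pass 2: running maximum of slack (arrival - prefix)
def fifoSlacks : Int → List ((Int × Int × Int) × Int) → List Int
  | _, [] => []
  | m, ((_, arrival, _), p) :: rest =>
    let m' := max m (arrival - p)
    m' :: fifoSlacks m' rest

def fifo_alt (processes : List (Int × Int × Int)) : (List (Int × Int × Int)) × (List (Int × Int × Int)) :=
  let order := PySem.List.sorted processes (fun x => x.2.1) false
  let prefixes := fifoPrefixes 0 order
  let slacks := fifoSlacks 0 (order.zip prefixes)
  let triples := order.zip (prefixes.zip slacks)
  let gantt_chart := triples.map
    (fun t => (t.1.1, t.2.1 + t.2.2, t.2.1 + t.1.2.2 + t.2.2))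
  let metrics := triples.map
    (fun t => (t.1.1, t.2.1 + t.2.2 - t.1.2.1, t.2.1 + t.1.2.2 + t.2.2 - t.1.2.1))
  (gantt_chart, metrics)

-- ===== PRECONDITION & SPEC =====
def Spec_fifo (processes : List (Int × Int × Int)) (out : (List (Int × Int × Int)) × (List (Int × Int × Int))) : Prop := out = fifo_alt processes
instance (processes : List (Int × Int × Int)) (out : (List (Int × Int × Int)) × (List (Int × Int × Int))) : Decidable (Spec_fifo processes out) := by unfold Spec_fifo; infer_instance

-- ===== CLAIM (what is proved, stated in full; the proofs are below) =====
def Claim_equal_fifo : Prop := ∀ (processes : List (Int × Int × Int)), Dom_fifo processes → Spec_fifo processes (fifo processes)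

-- ===== LEMMAS AND PROOFS =====

-- proof-only shorthands for B's two output vectors starting from state (t, m)
def fifoGanttOf (t m : Int) (s : List (Int × Int × Int)) : List (Int × Int × Int) :=
  (s.zip ((fifoPrefixes t s).zip (fifoSlacks m (s.zip (fifoPrefixes t s))))).map
    (fun x => (x.1.1, x.2.1 + x.2.2, x.2.1 + x.1.2.2 + x.2.2))

def fifoMetricsOf (t m : Int) (s : List (Int × Int × Int)) : List (Int × Int × Int) :=
  (s.zip ((fifoPrefixes t s).zip (fifoSlacks m (s.zip (fifoPrefixes t s))))).map
    (fun x => (x.1.1, x.2.1 + x.2.2 - x.1.2.1, x.2.1 + x.1.2.2 + x.2.2 - x.1.2.1))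

-- loop invariant: A's fold from clock c = t + m yields B's vectors, appended
theorem fifo_fold_eq (s : List (Int × Int × Int)) :
    ∀ (c t m : Int) (g mm : List (Int × Int × Int)), c = t + m →
    ∃ c', s.foldl
      (fun (st : Int × List (Int × Int × Int) × List (Int × Int × Int)) process =>
        let pid := process.1
        let arrival_time := process.2.1
        let burst_time := process.2.2
        let start_time := if st.1 < arrival_time then arrival_time else st.1
        let end_time := start_time + burst_time
        let waiting_time := start_time - arrival_time
        let turnaround_time := waiting_time + burst_time
        (end_time, st.2.1 ++ [(pid, start_time, end_time)],
                   st.2.2 ++ [(pid, waiting_time, turnaround_time)]))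
      (c, g, mm)
    = (c', g ++ fifoGanttOf t m s, mm ++ fifoMetricsOf t m s) := by
  induction s with
  | nil => intro c t m g mm _; exact ⟨c, by simp [fifoGanttOf, fifoMetricsOf, fifoPrefixes]⟩
  | cons p rest ih =>
    intro c t m g mm hc
    obtain ⟨pid, arr, burst⟩ := p
    have hstart : (if c < arr then arr else c) = t + max m (arr - t) := by
      split_ifs <;> omega
    have hend : t + max m (arr - t) + burst = t + burst + max m (arr - t) := by omega
    have hturn : t + max m (arr - t) - arr + burst
               = t + burst + max m (arr - t) - arr := by omega
    obtain ⟨c', hih⟩ := ih ((if c < arr then arr else c) + burst) (t + burst) (max m (arr - t))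
      (g ++ [(pid, if c < arr then arr else c, (if c < arr then arr else c) + burst)])
      (mm ++ [(pid, (if c < arr then arr else c) - arr,
                    (if c < arr then arr else c) - arr + burst)])
      (by omega)
    refine ⟨c', ?_⟩
    simp only [List.foldl_cons, hih, fifoGanttOf, fifoMetricsOf, fifoPrefixes, fifoSlacks,
      List.zip_cons_cons, List.map_cons, List.append_assoc, List.cons_append, List.nil_append]
    rw [hstart, hend, hturn]

-- ===== VERDICT (by name: the statement is the Claim_ definition above) =====
theorem fifo_spec : Claim_equal_fifo := by
  intro processes _
  unfold Spec_fifo fifo fifo_alt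
  obtain ⟨c', h⟩ := fifo_fold_eq (PySem.List.sorted processes (fun x => x.2.1) false)
    0 0 0 [] [] (by omega)
  simp only [h, fifoGanttOf, fifoMetricsOf]
  simp
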